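-- pv_equiv track=rewrite | github.com/juanmcristobal/text2ioc | tests/oracle_ioc.py | _ipv4_context_window
-- ===== SOURCE A (Python) =====
-- def _is_ipv4_context_break(ch: str) -> bool:
--     return ch in {"\n", "\r", "!", "?", ";"}
--
-- def _ipv4_context_window(text: str, entry_pos: int, entry: str) -> str:
--     if not text or entry_pos < 0:
--         return ""
--
--     window = 160
--     end = min(entry_pos + len(entry), len(text))
--     left = max(0, entry_pos - window)
--     right = min(len(text), end + window)
--
--     for idx in range(entry_pos - 1, left - 1, -1):
--         if _is_ipv4_context_break(text[idx]):
--             left = idx + 1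
--             break
--
--     for idx in range(end, right):
--         if _is_ipv4_context_break(text[idx]):
--             right = idx
--             break
--
--     return text[left:right].strip()
-- ===== SOURCE B (Python) =====
-- def _ipv4_context_window(text: str, entry_pos: int, entry: str) -> str:
--     if not text or entry_pos < 0:
--         return ""
--
--     end = min(entry_pos + len(entry), len(text))
--     left = max(0, entry_pos - 160)
--     right = min(len(text), end + 160)
--
--     breaks = [i for i, ch in enumerate(text) if ch in "\n\r!?;"]
--     left = max((i + 1 for i in breaks if left <= i < entry_pos), default=left)
--     right = min((i for i in breaks if end <= i < right), default=right)
--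
--     return text[left:right].strip()
-- ===== Notes on version B (the rewrite author's own statement) =====
-- stated objective: alternative
-- what changed: Replaced the two index-by-index break-scanning loops (backward with early break, forward with early break) by one enumerate pass collecting all break positions followed by pure arithmetic max/min selection with defaults.
import Mathlib
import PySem

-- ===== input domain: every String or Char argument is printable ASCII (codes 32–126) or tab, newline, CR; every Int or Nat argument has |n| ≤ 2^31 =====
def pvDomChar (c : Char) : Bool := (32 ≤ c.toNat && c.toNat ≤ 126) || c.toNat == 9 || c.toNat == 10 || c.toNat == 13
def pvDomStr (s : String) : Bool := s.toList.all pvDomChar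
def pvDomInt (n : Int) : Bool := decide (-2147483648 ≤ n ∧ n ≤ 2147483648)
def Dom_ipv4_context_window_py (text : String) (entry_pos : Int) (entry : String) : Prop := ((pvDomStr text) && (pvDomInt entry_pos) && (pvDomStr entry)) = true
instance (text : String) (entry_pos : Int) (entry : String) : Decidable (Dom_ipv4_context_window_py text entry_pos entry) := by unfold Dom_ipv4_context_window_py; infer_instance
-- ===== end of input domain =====

-- B replaces A's two index-scanning loops by one enumerate pass collecting all break
-- positions plus arithmetic max/min selection (objective: alternative, not faster).

-- ===== PORT A =====
-- ch in {"\n", "\r", "!", "?", ";"}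
def ipv4Break (ch : Char) : Bool := ch == '\n' || ch == '\r' || ch == '!' || ch == '?' || ch == ';'

-- 'for idx in range(start, stop, -1): if break(text[idx]): left = idx+1; break' — fuel = number of iterations
def aScanBack (tl : List Char) (idx : Int) : Nat → Option Int
  | 0 => none
  | f + 1 => if ipv4Break (PySem.List.pyGetD tl idx ' ') then some idx else aScanBack tl (idx - 1) f

-- 'for idx in range(end, right): if break(text[idx]): right = idx; break'
def aScanFwd (tl : List Char) (idx : Int) : Nat → Option Int
  | 0 => none
  | f + 1 => if ipv4Break (PySem.List.pyGetD tl idx ' ') then some idx else aScanFwd tl (idx + 1) f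

def ipv4_context_window_py (text : String) (entry_pos : Int) (entry : String) : String :=
  if text = "" ∨ entry_pos < 0 then "" else
    let tl := text.toList
    let window : Int := 160
    let endP : Int := min (entry_pos + (entry.toList.length : Int)) (tl.length : Int)
    let left : Int := max 0 (entry_pos - window)
    let right : Int := min (tl.length : Int) (endP + window)
    let left2 : Int :=
      match aScanBack tl (entry_pos - 1) (entry_pos - left).toNat with
      | some idx => idx + 1
      | none => left
    let right2 : Int :=
      match aScanFwd tl endP (right - endP).toNat with
      | some idx => idx
      | none => right
    PySem.Str.strip (PySem.Str.slice text (some left2) (some right2))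

-- ===== PORT B =====
def altIsBreak (ch : Char) : Bool := ("\n\r!?;".toList).contains ch

-- breaks = [i for i, ch in enumerate(text) if ch in "\n\r!?;"]
def breaksOf (tl : List Char) : List Int :=
  ((PySem.List.enumerate tl 0).filter (fun q => altIsBreak q.2)).map (fun q => q.1)

def ipv4_context_window_py_alt (text : String) (entry_pos : Int) (entry : String) : String :=
  if text = "" ∨ entry_pos < 0 then "" else
    let tl := text.toList
    let endP : Int := min (entry_pos + (entry.toList.length : Int)) (tl.length : Int)
    let left : Int := max 0 (entry_pos - 160)
    let right : Int := min (tl.length : Int) (endP + 160)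
    let breaks := breaksOf tl
    let left2 : Int :=
      (PySem.List.max? ((breaks.filter (fun i => decide (left ≤ i) && decide (i < entry_pos))).map (fun i => i + 1)) (fun x => x)).getD left
    let right2 : Int :=
      (PySem.List.min? (breaks.filter (fun i => decide (endP ≤ i) && decide (i < right))) (fun x => x)).getD right
    PySem.Str.strip (PySem.Str.slice text (some left2) (some right2))

-- ===== PRECONDITION & SPEC =====
-- Pre_ excludes only the inputs where A raises IndexError: non-empty text with entry_pos > len(text).
def Pre_ipv4_context_window_py (text : String) (entry_pos : Int) (entry : String) : Prop :=
  text = "" ∨ entry_pos < 0 ∨ entry_pos ≤ (text.toList.length : Int)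
instance (text : String) (entry_pos : Int) (entry : String) : Decidable (Pre_ipv4_context_window_py text entry_pos entry) := by unfold Pre_ipv4_context_window_py; infer_instance

def pvWitness_ipv4_context_window_py : String × Int × String := ("abc!def 1.2.3.4 ok", 8, "1.2.3.4")

def Spec_ipv4_context_window_py (text : String) (entry_pos : Int) (entry : String) (out : String) : Prop := out = ipv4_context_window_py_alt text entry_pos entry
instance (text : String) (entry_pos : Int) (entry : String) (out : String) : Decidable (Spec_ipv4_context_window_py text entry_pos entry out) := by unfold Spec_ipv4_context_window_py; infer_instance

-- ===== CLAIM (what is proved, stated in full; the proofs are below) =====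
def Claim_equal_ipv4_context_window_py : Prop := ∀ (text : String) (entry_pos : Int) (entry : String), Dom_ipv4_context_window_py text entry_pos entry → Pre_ipv4_context_window_py text entry_pos entry → Spec_ipv4_context_window_py text entry_pos entry (ipv4_context_window_py text entry_pos entry)

-- ===== LEMMAS AND PROOFS =====

lemma altBreak_eq (c : Char) : altIsBreak c = ipv4Break c := by
  have h : "\n\r!?;".toList = ['\n', '\r', '!', '?', ';'] := by decide
  simp only [altIsBreak, ipv4Break, h, List.contains_cons, List.contains_nil, Bool.or_false]
  simp [Bool.or_assoc]

lemma pyGetD_at (tl : List Char) (k : Nat) (h : k < tl.length) :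
    PySem.List.pyGetD tl (k : Int) ' ' = tl[k] := by
  simp [List.getElem?_eq_getElem h]

lemma brk_nat (tl : List Char) (k : Nat) (h : k < tl.length) :
    altIsBreak tl[k] = ipv4Break (PySem.List.pyGetD tl (k : Int) ' ') := by
  rw [altBreak_eq, pyGetD_at tl k h]

lemma scanBack_some (tl : List Char) : ∀ (f : Nat) (idx j : Int),
    aScanBack tl idx f = some j →
    idx + 1 - f ≤ j ∧ j ≤ idx ∧ ipv4Break (PySem.List.pyGetD tl j ' ') = true ∧
      ∀ j', j < j' → j' ≤ idx → ipv4Break (PySem.List.pyGetD tl j' ' ') = false := by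
  intro f
  induction f with
  | zero => intro idx j h; simp [aScanBack] at h
  | succ f ih =>
    intro idx j h
    rw [aScanBack] at h
    by_cases hb : ipv4Break (PySem.List.pyGetD tl idx ' ') = true
    · rw [if_pos hb] at h
      obtain rfl : idx = j := by injection h
      refine ⟨by omega, le_refl _, hb, ?_⟩
      intro j' h1 h2; omega
    · rw [if_neg hb] at h
      obtain ⟨h1, h2, h3, h4⟩ := ih (idx - 1) j h
      refine ⟨by omega, by omega, h3, ?_⟩
      intro j' hj1 hj2
      rcases lt_or_eq_of_le hj2 with hlt | rfl
      · exact h4 j' hj1 (by omega)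
      · simpa using hb

lemma scanBack_none (tl : List Char) : ∀ (f : Nat) (idx : Int),
    aScanBack tl idx f = none →
    ∀ j, idx + 1 - f ≤ j → j ≤ idx → ipv4Break (PySem.List.pyGetD tl j ' ') = false := by
  intro f
  induction f with
  | zero => intro idx h j h1 h2; omega
  | succ f ih =>
    intro idx h j h1 h2
    rw [aScanBack] at h
    by_cases hb : ipv4Break (PySem.List.pyGetD tl idx ' ') = true
    · simp [hb] at h
    · rw [if_neg hb] at h
      rcases lt_or_eq_of_le h2 with hlt | rfl
      · exact ih (idx - 1) h j (by omega) (by omega)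
      · simpa using hb

lemma scanFwd_some (tl : List Char) : ∀ (f : Nat) (idx j : Int),
    aScanFwd tl idx f = some j →
    idx ≤ j ∧ j < idx + f ∧ ipv4Break (PySem.List.pyGetD tl j ' ') = true ∧
      ∀ j', idx ≤ j' → j' < j → ipv4Break (PySem.List.pyGetD tl j' ' ') = false := by
  intro f
  induction f with
  | zero => intro idx j h; simp [aScanFwd] at h
  | succ f ih =>
    intro idx j h
    rw [aScanFwd] at h
    by_cases hb : ipv4Break (PySem.List.pyGetD tl idx ' ') = true
    · rw [if_pos hb] at h
      obtain rfl : idx = j := by injection h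
      refine ⟨le_refl _, by omega, hb, ?_⟩
      intro j' h1 h2; omega
    · rw [if_neg hb] at h
      obtain ⟨h1, h2, h3, h4⟩ := ih (idx + 1) j h
      refine ⟨by omega, by omega, h3, ?_⟩
      intro j' hj1 hj2
      rcases lt_or_eq_of_le hj1 with hlt | rfl
      · exact h4 j' (by omega) hj2
      · simpa using hb

lemma scanFwd_none (tl : List Char) : ∀ (f : Nat) (idx : Int),
    aScanFwd tl idx f = none →
    ∀ j, idx ≤ j → j < idx + f → ipv4Break (PySem.List.pyGetD tl j ' ') = false := by
  intro f
  induction f with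
  | zero => intro idx h j h1 h2; omega
  | succ f ih =>
    intro idx h j h1 h2
    rw [aScanFwd] at h
    by_cases hb : ipv4Break (PySem.List.pyGetD tl idx ' ') = true
    · simp [hb] at h
    · rw [if_neg hb] at h
      rcases lt_or_eq_of_le h1 with hlt | rfl
      · exact ih (idx + 1) h j (by omega) (by omega)
      · simpa using hb

lemma mem_breaksOf (tl : List Char) (i : Int) :
    i ∈ breaksOf tl ↔ ∃ (k : Nat) (h : k < tl.length), i = (k : Int) ∧ altIsBreak tl[k] = true := by
  simp only [breaksOf, List.mem_map, List.mem_filter, PySem.List.mem_enumerate_iff]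
  constructor
  · rintro ⟨⟨a, b⟩, ⟨⟨k, hk, hp⟩, hbrk⟩, rfl⟩
    obtain ⟨ha, hb⟩ := Prod.mk.inj hp
    exact ⟨k, hk, by omega, by simpa [hb] using hbrk⟩
  · rintro ⟨k, hk, rfl, hbrk⟩
    exact ⟨((k : Int), tl[k]), ⟨⟨k, hk, by simp⟩, hbrk⟩, rfl⟩

lemma back_found (tl : List Char) (p l0 j : Int) (h0 : 0 ≤ l0) (hl : l0 ≤ p)
    (hp : p ≤ (tl.length : Int))
    (h : aScanBack tl (p - 1) (p - l0).toNat = some j) :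
    PySem.List.max? (((breaksOf tl).filter (fun i => decide (l0 ≤ i) && decide (i < p))).map (fun i => i + 1)) (fun x => x) = some (j + 1) := by
  obtain ⟨h1, h2, h3, h4⟩ := scanBack_some tl _ _ _ h
  have hcast : (((p - l0).toNat : Int)) = p - l0 := by omega
  rw [hcast] at h1
  have hjn : j.toNat < tl.length := by omega
  have hjmem : j + 1 ∈ ((breaksOf tl).filter (fun i => decide (l0 ≤ i) && decide (i < p))).map (fun i => i + 1) := by
    refine List.mem_map.2 ⟨j, List.mem_filter.2 ⟨?_, by simp; omega⟩, rfl⟩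
    refine (mem_breaksOf tl j).2 ⟨j.toNat, hjn, by omega, ?_⟩
    rw [brk_nat tl j.toNat hjn, show ((j.toNat : Int)) = j by omega]
    exact h3
  have hub : ∀ x ∈ ((breaksOf tl).filter (fun i => decide (l0 ≤ i) && decide (i < p))).map (fun i => i + 1), x ≤ j + 1 := by
    intro x hx
    obtain ⟨i, hif, rfl⟩ := List.mem_map.1 hx
    obtain ⟨hib, hcond⟩ := List.mem_filter.1 hif
    obtain ⟨k, hk, rfl, hbrk⟩ := (mem_breaksOf tl i).1 hib
    simp only [Bool.and_eq_true, decide_eq_true_eq] at hcond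
    by_contra hgt
    have hji : j < (k : Int) := by omega
    have hfalse := h4 (k : Int) hji (by omega)
    rw [← brk_nat tl k hk, hbrk] at hfalse
    simp at hfalse
  cases hm : PySem.List.max? (((breaksOf tl).filter (fun i => decide (l0 ≤ i) && decide (i < p))).map (fun i => i + 1)) (fun x => x) with
  | none =>
    rw [PySem.List.max?_eq_none_iff] at hm
    rw [hm] at hjmem
    simp at hjmem
  | some m =>
    have hmm := PySem.List.max?_mem hm
    have hge := PySem.List.max?_isMax hm _ hjmem
    have hle := hub m hmm
    simp only at hge
    congr 1
    omega

lemma back_none (tl : List Char) (p l0 : Int) (h0 : 0 ≤ l0) (hl : l0 ≤ p)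
    (hp : p ≤ (tl.length : Int))
    (h : aScanBack tl (p - 1) (p - l0).toNat = none) :
    (breaksOf tl).filter (fun i => decide (l0 ≤ i) && decide (i < p)) = [] := by
  rw [List.eq_nil_iff_forall_not_mem]
  intro i hi
  obtain ⟨hib, hcond⟩ := List.mem_filter.1 hi
  obtain ⟨k, hk, rfl, hbrk⟩ := (mem_breaksOf tl i).1 hib
  simp only [Bool.and_eq_true, decide_eq_true_eq] at hcond
  have hfalse := scanBack_none tl _ _ h (k : Int) (by omega) (by omega)
  rw [← brk_nat tl k hk, hbrk] at hfalse
  simp at hfalse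

lemma fwd_found (tl : List Char) (e r0 j : Int) (h0 : 0 ≤ e) (he : e ≤ r0)
    (hr : r0 ≤ (tl.length : Int))
    (h : aScanFwd tl e (r0 - e).toNat = some j) :
    PySem.List.min? ((breaksOf tl).filter (fun i => decide (e ≤ i) && decide (i < r0))) (fun x => x) = some j := by
  obtain ⟨h1, h2, h3, h4⟩ := scanFwd_some tl _ _ _ h
  have hcast : (((r0 - e).toNat : Int)) = r0 - e := by omega
  rw [hcast] at h2
  have hjn : j.toNat < tl.length := by omega
  have hjmem : j ∈ (breaksOf tl).filter (fun i => decide (e ≤ i) && decide (i < r0)) := by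
    refine List.mem_filter.2 ⟨?_, by simp; omega⟩
    refine (mem_breaksOf tl j).2 ⟨j.toNat, hjn, by omega, ?_⟩
    rw [brk_nat tl j.toNat hjn, show ((j.toNat : Int)) = j by omega]
    exact h3
  have hlb : ∀ x ∈ (breaksOf tl).filter (fun i => decide (e ≤ i) && decide (i < r0)), j ≤ x := by
    intro x hx
    obtain ⟨hib, hcond⟩ := List.mem_filter.1 hx
    obtain ⟨k, hk, rfl, hbrk⟩ := (mem_breaksOf tl x).1 hib
    simp only [Bool.and_eq_true, decide_eq_true_eq] at hcond
    by_contra hlt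
    have hfalse := h4 (k : Int) (by omega) (by omega)
    rw [← brk_nat tl k hk, hbrk] at hfalse
    simp at hfalse
  cases hm : PySem.List.min? ((breaksOf tl).filter (fun i => decide (e ≤ i) && decide (i < r0))) (fun x => x) with
  | none =>
    rw [PySem.List.min?_eq_none_iff] at hm
    rw [hm] at hjmem
    simp at hjmem
  | some m =>
    have hmm := PySem.List.min?_mem hm
    have hle := PySem.List.min?_isMin hm _ hjmem
    have hge := hlb m hmm
    simp only at hle
    congr 1
    omega

lemma fwd_none (tl : List Char) (e r0 : Int) (h0 : 0 ≤ e) (he : e ≤ r0)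
    (hr : r0 ≤ (tl.length : Int))
    (h : aScanFwd tl e (r0 - e).toNat = none) :
    (breaksOf tl).filter (fun i => decide (e ≤ i) && decide (i < r0)) = [] := by
  rw [List.eq_nil_iff_forall_not_mem]
  intro i hi
  obtain ⟨hib, hcond⟩ := List.mem_filter.1 hi
  obtain ⟨k, hk, rfl, hbrk⟩ := (mem_breaksOf tl i).1 hib
  simp only [Bool.and_eq_true, decide_eq_true_eq] at hcond
  have hfalse := scanFwd_none tl _ _ h (k : Int) (by omega) (by omega)
  rw [← brk_nat tl k hk, hbrk] at hfalse
  simp at hfalse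

-- ===== VERDICT (by name: the statement is the Claim_ definition above) =====
theorem ipv4_context_window_py_spec : Claim_equal_ipv4_context_window_py := by
  unfold Claim_equal_ipv4_context_window_py
  intro text p entry hdom hpre
  unfold Spec_ipv4_context_window_py
  unfold ipv4_context_window_py ipv4_context_window_py_alt
  by_cases hg : text = "" ∨ p < 0
  · simp [hg]
  · rw [if_neg hg, if_neg hg]
    push_neg at hg
    obtain ⟨hne, hp0⟩ := hg
    have hplen : p ≤ (text.toList.length : Int) := by
      rcases hpre with h | h | h
      · exact absurd h hne
      · omega
      · exact h
    set tl := text.toList with htl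
    set endP : Int := min (p + (entry.toList.length : Int)) (tl.length : Int) with hendP
    set l0 : Int := max 0 (p - 160) with hl0
    set r0 : Int := min (tl.length : Int) (endP + 160) with hr0
    have hml : ∃ m : Int, entry.toList.length = m ∧ 0 ≤ m := ⟨_, rfl, by positivity⟩
    have h0l : (0:Int) ≤ l0 := by omega
    have hlp : l0 ≤ p := by omega
    have h0e : (0:Int) ≤ endP := by
      obtain ⟨m, hm, hm0⟩ := hml
      simp only [hendP]
      omega
    have her : endP ≤ r0 := by
      simp only [hendP, hr0] at *
      omega
    have hrn : r0 ≤ (tl.length : Int) := by omega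
    have hL : (match aScanBack tl (p - 1) (p - l0).toNat with
                | some idx => idx + 1
                | none => l0)
        = (PySem.List.max? (((breaksOf tl).filter (fun i => decide (l0 ≤ i) && decide (i < p))).map (fun i => i + 1)) (fun x => x)).getD l0 := by
      cases hb : aScanBack tl (p - 1) (p - l0).toNat with
      | some j => rw [back_found tl p l0 j h0l hlp hplen hb]; rfl
      | none => rw [back_none tl p l0 h0l hlp hplen hb]; rfl
    have hR : (match aScanFwd tl endP (r0 - endP).toNat with
                | some idx => idx
                | none => r0)
        = (PySem.List.min? ((breaksOf tl).filter (fun i => decide (endP ≤ i) && decide (i < r0))) (fun x => x)).getD r0 := by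
      cases hb : aScanFwd tl endP (r0 - endP).toNat with
      | some j => rw [fwd_found tl endP r0 j h0e her hrn hb]; rfl
      | none => rw [fwd_none tl endP r0 h0e her hrn hb]; rfl
    simp only []
    rw [hL, hR]
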